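-- pv_equiv track=rewrite | github.com/mmjmike/repseq | repseq/logo.py | sum_motif_dicts
-- ===== SOURCE A (Python) =====
-- def sum_motif_dicts(list_of_dicts):
--     variants = list(list_of_dicts[0].keys())
--     seq_len = len(list_of_dicts[0][list(list_of_dicts[0].keys())[0]])
--     sum_motif_dict = {var: [0 for i in range(seq_len)] for var in variants}
--     for motif_dict in list_of_dicts:
--         for var in variants:
--             sum_motif_dict[var] = [a + b for a, b in zip(sum_motif_dict[var], motif_dict[var])]
--     return sum_motif_dict
-- ===== SOURCE B (Python) =====
-- def sum_motif_dicts(list_of_dicts):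
--     variants = list(list_of_dicts[0].keys())
--     return {var: [sum(col) for col in zip(*(d[var] for d in list_of_dicts))]
--             for var in variants}
-- ===== Notes on version B (the rewrite author's own statement) =====
-- stated objective: idiomatic
-- what changed: Replaces A's running accumulator (a zeros list rebuilt by an element-wise zip-add for every dict) with the idiomatic transpose-and-reduce: each variant's value is computed in one dict comprehension as the column sums of zip(*(d[var] for d in list_of_dicts)).
-- intended difference: On inputs where, for some variant, every dict's value list is strictly longer than the first dict's first variant's list, A truncates that variant's sums to that unrelated first length (a stale cap from its zero-initialised accumulator), while B returns the element-wise sums over the variant's own common length, which is the intended per-position sum. — e.g. on sum_motif_dicts([[("a", [1]), ("b", [2, 3])]]): A returns [("a", [1]), ("b", [2])], B returns [("a", [1]), ("b", [2, 3])]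
import Mathlib
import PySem

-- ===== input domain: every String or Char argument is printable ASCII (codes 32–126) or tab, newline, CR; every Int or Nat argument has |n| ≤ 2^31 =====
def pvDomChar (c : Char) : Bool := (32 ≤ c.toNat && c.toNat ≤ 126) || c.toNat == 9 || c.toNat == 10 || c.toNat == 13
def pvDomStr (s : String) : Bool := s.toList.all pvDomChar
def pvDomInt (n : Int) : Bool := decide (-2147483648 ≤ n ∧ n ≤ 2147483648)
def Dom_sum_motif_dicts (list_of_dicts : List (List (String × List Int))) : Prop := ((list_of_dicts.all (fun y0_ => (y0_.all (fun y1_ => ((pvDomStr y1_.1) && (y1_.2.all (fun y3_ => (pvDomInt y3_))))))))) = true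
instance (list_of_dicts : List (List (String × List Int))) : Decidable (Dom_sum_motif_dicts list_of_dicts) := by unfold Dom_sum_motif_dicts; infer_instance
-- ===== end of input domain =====

-- B replaces A's dict-by-dict running accumulator (a zeros list rebuilt by an element-wise
-- zip-add for every dict) by the idiomatic transpose-and-reduce: each variant's column list is
-- summed directly via zip(*). On inputs where every dict's list for some variant is longer than
-- the first variant's list, A truncates that variant to the first variant's length (a stale cap
-- from its zero-initialisation) while B sums the variant's full common length (see D_ below).

-- ===== PORT A =====
-- The assoc lists are Python dicts: converted via PySem.Dict.ofList (dict() semantics: last value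
-- wins, first insertion position kept).  `sum_motif_dict[var]` is always present, and Pre_ puts
-- `motif_dict[var]` in every dict, so the KeyError-free lookups are ported with getD.
def sum_motif_dicts (list_of_dicts : List (List (String × List Int))) : List (String × List Int) :=
  let dicts := list_of_dicts.map (fun l => PySem.Dict.ofList l)
  let d0 := dicts.headD PySem.Dict.empty          -- list_of_dicts[0]; Pre_ excludes the empty list
  let variants := PySem.Dict.keys d0
  -- len(list_of_dicts[0][list(...keys())[0]]); Pre_ excludes an empty first dict
  let seq_len : Int := ((d0.getD (variants.headD "") []).length : Int)
  let init := variants.foldl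
    (fun d v => d.insert v ((PySem.List.pyRange 0 seq_len 1).map (fun _ => (0 : Int))))
    PySem.Dict.empty
  let final := dicts.foldl (fun acc md =>
    variants.foldl (fun acc v =>
      acc.insert v (List.zipWith (· + ·) (acc.getD v []) (md.getD v []))) acc) init
  final.items

-- ===== PORT B =====
-- zip(*iterables) for ≥1 iterable, as the standard nested binary zip: the column list of the
-- remaining iterables is extended by consing the current iterable's elements (truncating to the
-- shortest, exactly Python's zip). B never calls it with zero iterables.
def pyZipStar : List (List Int) → List (List Int)
  | [] => []
  | [a] => a.map (fun x => [x])
  | a :: t => List.zipWith (fun x col => x :: col) a (pyZipStar t)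

def sum_motif_dicts_alt (list_of_dicts : List (List (String × List Int))) : List (String × List Int) :=
  let dicts := list_of_dicts.map (fun l => PySem.Dict.ofList l)
  let first := dicts.headD PySem.Dict.empty       -- list_of_dicts[0]; Pre_ excludes the empty list
  let variants := PySem.Dict.keys first
  -- {var: [sum(col) for col in zip(*(d[var] for d in list_of_dicts))] for var in variants}
  (variants.foldl (fun out v =>
      out.insert v ((pyZipStar (dicts.map (fun d => d.getD v []))).map List.sum))
    PySem.Dict.empty).items

-- ===== PRECONDITION & SPEC =====
-- Pre_ = exactly where Python A returns: a nonempty list (else IndexError), whose first dict is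
-- nonempty (else IndexError on keys()[0]) and whose every variant occurs as a key of every dict
-- (else KeyError on motif_dict[var]).
def Pre_sum_motif_dicts (list_of_dicts : List (List (String × List Int))) : Prop :=
  list_of_dicts ≠ [] ∧ list_of_dicts.headD [] ≠ [] ∧
    ∀ l ∈ list_of_dicts, ∀ p ∈ list_of_dicts.headD [], p.1 ∈ l.map Prod.fst
instance (list_of_dicts : List (List (String × List Int))) : Decidable (Pre_sum_motif_dicts list_of_dicts) := by unfold Pre_sum_motif_dicts; infer_instance
def pvWitness_sum_motif_dicts : (List (List (String × List Int))) :=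
  [[("a", [1, 2]), ("b", [3])], [("a", [5, 6]), ("b", [7])]]

-- On inputs where, for some variant, every dict's value list is strictly longer than the first
-- dict's first variant's list, A truncates that variant's sums to that unrelated first length (a
-- stale cap inherited from its zero-initialised accumulator) while B returns the element-wise sum
-- over the variant's own common length, which is the intended per-position motif count sum.
def D_sum_motif_dicts (list_of_dicts : List (List (String × List Int))) : Prop :=
  let d0 := PySem.Dict.ofList (list_of_dicts.headD [])
  let seq_len := (d0.getD (d0.keys.headD "") []).length
  ∃ v ∈ d0.keys, ∀ l ∈ list_of_dicts, seq_len < ((PySem.Dict.ofList l).getD v []).length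
instance (list_of_dicts : List (List (String × List Int))) : Decidable (D_sum_motif_dicts list_of_dicts) := by unfold D_sum_motif_dicts; infer_instance

def Spec_sum_motif_dicts (list_of_dicts : List (List (String × List Int))) (out : List (String × List Int)) : Prop := ¬ D_sum_motif_dicts list_of_dicts → out = sum_motif_dicts_alt list_of_dicts
instance (list_of_dicts : List (List (String × List Int))) (out : List (String × List Int)) : Decidable (Spec_sum_motif_dicts list_of_dicts out) := by unfold Spec_sum_motif_dicts; infer_instance

def pvDiffWitness_sum_motif_dicts : (List (List (String × List Int))) :=
  [[("a", [1]), ("b", [2, 3])]]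
def pvDiffWitnessOut_sum_motif_dicts : (List (String × List Int)) × (List (String × List Int)) :=
  ([("a", [1]), ("b", [2])], [("a", [1]), ("b", [2, 3])])

-- ===== CLAIM (what is proved, stated in full; the proofs are below) =====
def Claim_unchanged_sum_motif_dicts : Prop := ∀ (list_of_dicts : List (List (String × List Int))), Dom_sum_motif_dicts list_of_dicts → Pre_sum_motif_dicts list_of_dicts → Spec_sum_motif_dicts list_of_dicts (sum_motif_dicts list_of_dicts)
def Claim_changed_sum_motif_dicts : Prop := Dom_sum_motif_dicts (pvDiffWitness_sum_motif_dicts) ∧ Pre_sum_motif_dicts (pvDiffWitness_sum_motif_dicts) ∧ D_sum_motif_dicts (pvDiffWitness_sum_motif_dicts) ∧ sum_motif_dicts (pvDiffWitness_sum_motif_dicts) = pvDiffWitnessOut_sum_motif_dicts.1 ∧ sum_motif_dicts_alt (pvDiffWitness_sum_motif_dicts) = pvDiffWitnessOut_sum_motif_dicts.2 ∧ pvDiffWitnessOut_sum_motif_dicts.1 ≠ pvDiffWitnessOut_sum_motif_dicts.2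
def Claim_exact_sum_motif_dicts : Prop := ∀ (list_of_dicts : List (List (String × List Int))), Dom_sum_motif_dicts list_of_dicts → Pre_sum_motif_dicts list_of_dicts → D_sum_motif_dicts list_of_dicts → sum_motif_dicts list_of_dicts ≠ sum_motif_dicts_alt list_of_dicts

-- ===== LEMMAS AND PROOFS =====

-- the length of the columns produced: the running minimum of the lists' lengths
def minLL : List (List Int) → Nat
  | [] => 0
  | a :: t => t.foldl (fun m l => min m l.length) a.length

lemma foldl_min_start (t : List (List Int)) (s x : Nat) :
    t.foldl (fun m l => min m l.length) (min s x)
      = min s (t.foldl (fun m l => min m l.length) x) := by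
  induction t generalizing x with
  | nil => rfl
  | cons l t ih => simp only [List.foldl_cons, min_assoc, ih]

lemma minLL_cons (a : List Int) (b : List Int) (u : List (List Int)) :
    minLL (a :: b :: u) = min a.length (minLL (b :: u)) := by
  show u.foldl (fun m l => min m l.length) (min a.length b.length)
      = min a.length (u.foldl (fun m l => min m l.length) b.length)
  exact foldl_min_start u a.length b.length

lemma minLL_le_mem (a : List Int) (t : List (List Int)) (l : List Int)
    (hl : l ∈ a :: t) : minLL (a :: t) ≤ l.length := by
  have hrw : (t.foldl (fun m l => min m l.length) a.length)
      = (t.map List.length).foldl min a.length := List.foldl_map.symm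
  rcases List.mem_cons.mp hl with h | h
  · subst h
    show t.foldl (fun m l => min m l.length) l.length ≤ l.length
    rw [hrw]
    exact (PySem.List.foldl_min_le _ _).1
  · show t.foldl (fun m l => min m l.length) a.length ≤ l.length
    rw [hrw]
    exact (PySem.List.foldl_min_le _ _).2 l.length (List.mem_map_of_mem h)

lemma minLL_gt (a : List Int) (t : List (List Int)) (s : Nat)
    (h : ∀ l ∈ a :: t, s < l.length) : s < minLL (a :: t) := by
  show s < t.foldl (fun m l => min m l.length) a.length
  rw [show (t.foldl (fun m l => min m l.length) a.length)
      = (t.map List.length).foldl min a.length from List.foldl_map.symm]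
  rcases PySem.List.foldl_min_mem (t.map List.length) a.length with he | he
  · rw [he]; exact h a (by simp)
  · obtain ⟨l, hl, hlen⟩ := List.mem_map.mp he
    rw [← hlen]; exact h l (by simp [hl])

-- pyZipStar computes the truncated transpose
lemma pyZipStar_char : ∀ (ls : List (List Int)), ls ≠ [] →
    pyZipStar ls = (List.range (minLL ls)).map (fun i => ls.map (fun l => l.getD i 0)) := by
  intro ls
  induction ls with
  | nil => intro h; exact absurd rfl h
  | cons a t ih =>
    intro _
    cases t with
    | nil =>
      show a.map (fun x => [x]) = (List.range a.length).map _
      apply List.ext_getElem (by simp)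
      intro i h1 h2
      simp only [List.length_map] at h1
      simp [List.getD_eq_getElem?_getD, List.getElem?_eq_getElem, h1]
    | cons b u =>
      show List.zipWith (fun x col => x :: col) a (pyZipStar (b :: u)) = _
      rw [ih (by simp), minLL_cons]
      apply List.ext_getElem (by simp)
      intro i h1 h2
      have hi : i < min a.length (minLL (b :: u)) := by
        simpa using h1
      have ha : i < a.length := lt_of_lt_of_le hi (min_le_left _ _)
      have hm : i < minLL (b :: u) := lt_of_lt_of_le hi (min_le_right _ _)
      simp [List.getElem_zipWith, List.getD_eq_getElem?_getD, List.getElem?_eq_getElem, ha, hm]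

lemma getD_zipWith (a b : List Int) (i : Nat) (h : i < min a.length b.length) :
    (List.zipWith (· + ·) a b).getD i 0 = a.getD i 0 + b.getD i 0 := by
  have h1 : i < a.length := lt_of_lt_of_le h (min_le_left _ _)
  have h2 : i < b.length := lt_of_lt_of_le h (min_le_right _ _)
  simp [List.getD_eq_getElem?_getD, h1, h2, List.length_zipWith, lt_min_iff.mpr ⟨h1, h2⟩]

-- the zip-add running accumulator is the column-sum comprehension
lemma zip_fold_eq (ds : List (List Int)) (acc : List Int) :
    ds.foldl (fun a l => List.zipWith (· + ·) a l) acc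
      = (List.range (ds.foldl (fun m l => min m l.length) acc.length)).map
          (fun i => acc.getD i 0 + (ds.map (fun l => l.getD i 0)).sum) := by
  induction ds generalizing acc with
  | nil =>
      simp only [List.foldl_nil, List.map_nil, List.sum_nil, add_zero]
      symm
      apply List.ext_getElem (by simp)
      intro i h1 h2
      simp [List.getD_eq_getElem?_getD, h2]
  | cons l ds ih =>
      simp only [List.foldl_cons]
      rw [ih]
      rw [show (List.zipWith (· + ·) acc l).length = min acc.length l.length from
        List.length_zipWith]
      apply List.map_congr_left
      intro i hi
      have hi' : i < ds.foldl (fun m l => min m l.length) (min acc.length l.length) :=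
        List.mem_range.mp hi
      have hle : ds.foldl (fun m l => min m l.length) (min acc.length l.length)
          ≤ min acc.length l.length := by
        rw [show (fun (m : Nat) (l : List Int) => min m l.length)
              = (fun m l => min m (List.length l)) from rfl, ← List.foldl_map]
        exact (PySem.List.foldl_min_le _ _).1
      rw [getD_zipWith acc l i (lt_of_lt_of_le hi' hle)]
      simp [add_assoc]

-- a fold of inserts over distinct keys, each value a function of the key and the old value
lemma inner_getD (g : List Int → String → List Int) (variants : List String)
    (hn : variants.Nodup) (acc : PySem.Dict String (List Int)) (w : String) :
    (variants.foldl (fun a v => a.insert v (g (a.getD v []) v)) acc).getD w []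
      = if w ∈ variants then g (acc.getD w []) w else acc.getD w [] := by
  induction variants generalizing acc with
  | nil => simp
  | cons v vs ih =>
      simp only [List.foldl_cons]
      rcases List.nodup_cons.mp hn with ⟨hv, hvs⟩
      rw [ih hvs]
      by_cases hw : w ∈ vs
      · have hne : w ≠ v := fun h => hv (h ▸ hw)
        simp [hw, hne, PySem.Dict.getD_insert]
      · by_cases hwv : w = v
        · subst hwv
          simp [hw, PySem.Dict.getD_insert_self]
        · simp [hw, hwv, PySem.Dict.getD_insert]

lemma update_of_subset (s : PySem.Set String) (xs : List String)
    (h : ∀ x ∈ xs, x ∈ s) : PySem.Set.update s xs = s := by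
  induction xs generalizing s with
  | nil => rfl
  | cons x xs ih =>
      have hx : x ∈ s := h x (by simp)
      show PySem.Set.update (PySem.Set.add s x) xs = s
      rw [PySem.Set.add_of_mem hx]
      exact ih s (fun y hy => h y (by simp [hy]))

lemma ofList_aux (xs : List String) (s : List String) (h : (s ++ xs).Nodup) :
    xs.foldl PySem.Set.add s = s ++ xs := by
  induction xs generalizing s with
  | nil => simp
  | cons x xs ih =>
      have hx : x ∉ s := by
        intro hm
        exact (List.disjoint_of_nodup_append h) hm (by simp)
      simp only [List.foldl_cons]
      rw [PySem.Set.add_of_not_mem hx, ih (s ++ [x]) (by simpa using h)]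
      simp

lemma ofList_eq_self_of_nodup (xs : List String) (h : xs.Nodup) :
    PySem.Set.ofList xs = xs := by
  have := ofList_aux xs [] (by simpa using h)
  simpa [PySem.Set.ofList_eq_foldl] using this

-- A's whole double loop, read through getD
lemma outer_getD (variants : List String) (hn : variants.Nodup)
    (dicts : List (PySem.Dict String (List Int))) (acc : PySem.Dict String (List Int)) (w : String) :
    (dicts.foldl (fun acc md =>
        variants.foldl (fun acc v =>
          acc.insert v (List.zipWith (· + ·) (acc.getD v []) (md.getD v []))) acc) acc).getD w []
      = if w ∈ variants then
          dicts.foldl (fun x md => List.zipWith (· + ·) x (md.getD w [])) (acc.getD w [])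
        else acc.getD w [] := by
  induction dicts generalizing acc with
  | nil => simp
  | cons md ds ih =>
      simp only [List.foldl_cons]
      rw [ih, inner_getD (fun old v => List.zipWith (· + ·) old (md.getD v [])) variants hn acc w]
      by_cases hw : w ∈ variants <;> simp [hw]

-- A's double loop never changes the key list once every variant is a key
lemma outer_keys (variants : List String)
    (dicts : List (PySem.Dict String (List Int))) (acc : PySem.Dict String (List Int))
    (h : ∀ v ∈ variants, v ∈ acc.keys) :
    (dicts.foldl (fun acc md =>
        variants.foldl (fun acc v =>
          acc.insert v (List.zipWith (· + ·) (acc.getD v []) (md.getD v []))) acc) acc).keys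
      = acc.keys := by
  induction dicts generalizing acc with
  | nil => rfl
  | cons md ds ih =>
      simp only [List.foldl_cons]
      have hk : (variants.foldl (fun acc v =>
          acc.insert v (List.zipWith (· + ·) (acc.getD v []) (md.getD v []))) acc).keys
          = acc.keys := by
        rw [PySem.Dict.keys_foldl_insert]
        exact update_of_subset _ _ h
      rw [ih _ (by rw [hk]; exact h), hk]

-- both ports, characterised as a map over the variant list (lds nonempty)
lemma portA_char (x : List (String × List Int)) (t : List (List (String × List Int))) :
    sum_motif_dicts (x :: t)
      = (PySem.Dict.ofList x).keys.map (fun v =>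
          (v, (List.range (min ((PySem.Dict.ofList x).getD ((PySem.Dict.ofList x).keys.headD "") []).length
                  (minLL (((x :: t).map (fun l => PySem.Dict.ofList l)).map (fun d => d.getD v []))))).map
            (fun i => (((x :: t).map (fun l => PySem.Dict.ofList l)).map
                (fun d => (d.getD v []).getD i 0)).sum))) := by
  unfold sum_motif_dicts
  dsimp only
  rw [show List.headD (List.map (fun l => PySem.Dict.ofList l) (x :: t)) PySem.Dict.empty
        = PySem.Dict.ofList x from rfl]
  set dicts := (x :: t).map (fun l => PySem.Dict.ofList l) with hdicts
  set d0 := PySem.Dict.ofList x with hd0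
  set variants := d0.keys with hvar
  set seq_len : Int := ((d0.getD (variants.headD "") []).length : Int) with hseq
  have hnod : variants.Nodup := PySem.Dict.nodup_keys_ofList x
  have hupd : PySem.Set.update ([] : PySem.Set String) variants = variants := by
    show List.foldl PySem.Set.add [] variants = variants
    rw [← PySem.Set.ofList_eq_foldl]
    exact ofList_eq_self_of_nodup variants hnod
  set zeros := (PySem.List.pyRange 0 seq_len 1).map (fun _ => (0 : Int)) with hzeros
  have hzlen : zeros.length = (d0.getD (variants.headD "") []).length := by
    rw [hzeros]
    simp [PySem.List.length_pyRange_one, hseq]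
  have hzget : ∀ i : Nat, zeros.getD i 0 = 0 := by
    intro i
    rw [hzeros]
    by_cases hi : i < ((PySem.List.pyRange 0 seq_len 1).map (fun _ => (0 : Int))).length
    · rw [List.getD_eq_getElem _ _ hi]
      simp
    · rw [List.getD_eq_default _ _ (le_of_not_gt hi)]
  set init := variants.foldl (fun d v => d.insert v zeros) PySem.Dict.empty with hinit
  have hinitkeys : init.keys = variants := by
    rw [hinit, PySem.Dict.keys_foldl_insert, PySem.Dict.keys_empty]
    exact hupd
  have hinitgetD : ∀ w ∈ variants, init.getD w [] = zeros := by
    intro w hw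
    rw [hinit, inner_getD (fun _ _ => zeros) variants hnod PySem.Dict.empty w]
    simp [hw]
  set F := dicts.foldl (fun acc md =>
      variants.foldl (fun acc v =>
        acc.insert v (List.zipWith (· + ·) (acc.getD v []) (md.getD v []))) acc) init with hF
  have hFkeys : F.keys = variants := by
    rw [hF, outer_keys variants dicts init (by rw [hinitkeys]; exact fun v hv => hv), hinitkeys]
  have hFnodup : F.keys.Nodup := by rw [hFkeys]; exact hnod
  rw [PySem.Dict.items_eq_map_keys F hFnodup [], hFkeys]
  apply List.map_congr_left
  intro v hv
  refine Prod.ext rfl ?_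
  dsimp only
  show F.getD v [] = _
  rw [hF, outer_getD variants hnod dicts init v, if_pos hv, hinitgetD v hv]
  rw [show (dicts.foldl (fun x md => List.zipWith (· + ·) x (md.getD v [])) zeros)
      = ((dicts.map (fun d => d.getD v [])).foldl (fun a l => List.zipWith (· + ·) a l) zeros)
    from List.foldl_map.symm]
  rw [zip_fold_eq (dicts.map (fun d => d.getD v [])) zeros]
  simp only [List.foldl_map]
  have hfold : dicts.foldl (fun m d => min m (d.getD v []).length) zeros.length
      = min (d0.getD (variants.headD "") []).length
          (minLL (dicts.map (fun d => d.getD v []))) := by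
    rw [hzlen, hdicts]
    show ((PySem.Dict.ofList x :: t.map (fun l => PySem.Dict.ofList l)).foldl
        (fun m d => min m (d.getD v []).length) _) = _
    simp only [List.foldl_cons]
    rw [show ((t.map (fun l => PySem.Dict.ofList l)).foldl
          (fun m d => min m (d.getD v []).length)
          (min (d0.getD (variants.headD "") []).length ((PySem.Dict.ofList x).getD v []).length))
        = (((t.map (fun l => PySem.Dict.ofList l)).map (fun d => d.getD v [])).foldl
          (fun m l => min m l.length)
          (min (d0.getD (variants.headD "") []).length ((PySem.Dict.ofList x).getD v []).length))
      from (List.foldl_map (f := fun (d : PySem.Dict String (List Int)) => d.getD v [])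
        (g := fun m (l : List Int) => min m l.length)).symm]
    rw [foldl_min_start]
    rfl
  rw [hfold]
  apply List.map_congr_left
  intro i _
  rw [hzget i, zero_add]
  simp only [List.map_map]
  rfl

lemma portB_char (x : List (String × List Int)) (t : List (List (String × List Int))) :
    sum_motif_dicts_alt (x :: t)
      = (PySem.Dict.ofList x).keys.map (fun v =>
          (v, (List.range
                  (minLL (((x :: t).map (fun l => PySem.Dict.ofList l)).map (fun d => d.getD v [])))).map
            (fun i => (((x :: t).map (fun l => PySem.Dict.ofList l)).map
                (fun d => (d.getD v []).getD i 0)).sum))) := by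
  unfold sum_motif_dicts_alt
  dsimp only
  rw [show List.headD (List.map (fun l => PySem.Dict.ofList l) (x :: t)) PySem.Dict.empty
        = PySem.Dict.ofList x from rfl]
  set dicts := (x :: t).map (fun l => PySem.Dict.ofList l) with hdicts
  set variants := (PySem.Dict.ofList x).keys with hvar
  have hnod : variants.Nodup := PySem.Dict.nodup_keys_ofList x
  rw [PySem.Dict.items_foldl_insert_fresh variants (fun v => v)
        (fun v => (pyZipStar (dicts.map (fun d => d.getD v []))).map List.sum)
        PySem.Dict.empty (fun a _ => PySem.Dict.contains_empty (k := a)) (by simpa using hnod)]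
  show [] ++ _ = _
  rw [List.nil_append]
  apply List.map_congr_left
  intro v _
  refine Prod.ext rfl ?_
  dsimp only
  rw [pyZipStar_char (dicts.map (fun d => d.getD v [])) (by simp [hdicts])]
  rw [List.map_map]
  apply List.map_congr_left
  intro i _
  show ((dicts.map (fun d => d.getD v [])).map (fun l => l.getD i 0)).sum = _
  rw [List.map_map]
  rfl

theorem sum_motif_dicts_spec : Claim_unchanged_sum_motif_dicts := by
  intro lds _ hpre hnD
  rcases lds with _ | ⟨x, t⟩
  · exact absurd rfl hpre.1
  rw [portA_char, portB_char]
  apply List.map_congr_left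
  intro v hv
  refine Prod.ext rfl ?_
  dsimp only
  have hex : ∃ l ∈ x :: t,
      ((PySem.Dict.ofList l).getD v []).length
        ≤ ((PySem.Dict.ofList x).getD ((PySem.Dict.ofList x).keys.headD "") []).length := by
    by_contra hc
    push_neg at hc
    exact hnD ⟨v, hv, hc⟩
  obtain ⟨l, hl, hle⟩ := hex
  have hmem : (PySem.Dict.ofList l).getD v []
      ∈ ((x :: t).map (fun l => PySem.Dict.ofList l)).map (fun d => d.getD v []) :=
    List.mem_map_of_mem (List.mem_map_of_mem hl)
  have hM : minLL (((x :: t).map (fun l => PySem.Dict.ofList l)).map (fun d => d.getD v []))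
      ≤ ((PySem.Dict.ofList x).getD ((PySem.Dict.ofList x).keys.headD "") []).length :=
    le_trans (minLL_le_mem ((PySem.Dict.ofList x).getD v [])
      ((t.map (fun l => PySem.Dict.ofList l)).map (fun d => d.getD v [])) _ hmem) hle
  rw [min_eq_right hM]
theorem sum_motif_dicts_changed : Claim_changed_sum_motif_dicts := by
  unfold Claim_changed_sum_motif_dicts; decide
theorem sum_motif_dicts_tight : Claim_exact_sum_motif_dicts := by
  intro lds _ hpre hD hEq
  rcases lds with _ | ⟨x, t⟩
  · exact absurd rfl hpre.1
  rw [portA_char, portB_char] at hEq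
  have hD' : ∃ v ∈ (PySem.Dict.ofList x).keys, ∀ l ∈ x :: t,
      ((PySem.Dict.ofList x).getD ((PySem.Dict.ofList x).keys.headD "") []).length
        < ((PySem.Dict.ofList l).getD v []).length := hD
  obtain ⟨v, hv, hall⟩ := hD'
  obtain ⟨i, hi, hvi⟩ := List.mem_iff_getElem.mp hv
  have hi1 : i < ((PySem.Dict.ofList x).keys.map (fun v =>
      (v, (List.range (min ((PySem.Dict.ofList x).getD ((PySem.Dict.ofList x).keys.headD "") []).length
              (minLL (((x :: t).map (fun l => PySem.Dict.ofList l)).map (fun d => d.getD v []))))).map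
        (fun i => (((x :: t).map (fun l => PySem.Dict.ofList l)).map
            (fun d => (d.getD v []).getD i 0)).sum)))).length := by simpa using hi
  have hi2 : i < ((PySem.Dict.ofList x).keys.map (fun v =>
      (v, (List.range
              (minLL (((x :: t).map (fun l => PySem.Dict.ofList l)).map (fun d => d.getD v [])))).map
        (fun i => (((x :: t).map (fun l => PySem.Dict.ofList l)).map
            (fun d => (d.getD v []).getD i 0)).sum)))).length := by simpa using hi
  have h3 := List.getElem_of_eq hEq hi1
  rw [List.getElem_map, List.getElem_map, hvi] at h3
  have h4 := congrArg (fun p => p.2.length) h3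
  simp only [List.length_map, List.length_range] at h4
  have hstart : ((PySem.Dict.ofList x).getD ((PySem.Dict.ofList x).keys.headD "") []).length
      < ((PySem.Dict.ofList x).getD v []).length := hall x (by simp)
  have hmemb : ∀ l ∈ ((t.map (fun l => PySem.Dict.ofList l)).map (fun d => d.getD v [])),
      ((PySem.Dict.ofList x).getD ((PySem.Dict.ofList x).keys.headD "") []).length < l.length := by
    intro l hlm
    obtain ⟨d, hd, rfl⟩ := List.mem_map.mp hlm
    obtain ⟨l', hl', rfl⟩ := List.mem_map.mp hd
    exact hall l' (by simp [hl'])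
  have hSM : ((PySem.Dict.ofList x).getD ((PySem.Dict.ofList x).keys.headD "") []).length
      < minLL (((x :: t).map (fun l => PySem.Dict.ofList l)).map (fun d => d.getD v [])) := by
    refine minLL_gt _ _ _ ?_
    intro l hlm
    rcases List.mem_cons.mp hlm with h | h
    · subst h; exact hstart
    · exact hmemb l h
  omega
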